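-- pv_equiv track=rewrite | github.com/Justrussiaprogrammer/Meanders_counting_and_drawing | Game/functions_copy.py | matrix_to_meander
-- ===== SOURCE A (Python) =====
-- def matrix_to_meander(matrix):
--     """
--     :param matrix: list[list]; задаёт матрицу меандра
--     """
--     n = len(matrix)
--     ans_meander = [0] * n
--     cur_min_free = 1
--     used = [False] * n
--     for i in range(n):
--         line_sum = sum(matrix[i][i:])
--         pos = cur_min_free
--         plus = 0
--         while plus != line_sum:
--             if not used[pos - 1]:
--                 plus += 1
--             pos += 1
--         while used[pos - 1]:
--             pos += 1
--         ans_meander[i] = pos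
--         used[pos - 1] = True
--         if pos == cur_min_free:
--             cur_min_free += 1
--     return ans_meander
-- ===== SOURCE B (Python) =====
-- def matrix_to_meander(matrix):
--     free = list(range(1, len(matrix) + 1))
--     return [free.pop(sum(row[i:])) for i, row in enumerate(matrix)]
-- ===== Notes on version B (the rewrite author's own statement) =====
-- stated objective: simpler
-- what changed: Replaces A's boolean used-array, its two scanning while-loops and the cur_min_free tracking by a single sorted list of free positions from which each row's answer is free.pop(line_sum); B is a 3-line comprehension with no scans.
import Mathlib
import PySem

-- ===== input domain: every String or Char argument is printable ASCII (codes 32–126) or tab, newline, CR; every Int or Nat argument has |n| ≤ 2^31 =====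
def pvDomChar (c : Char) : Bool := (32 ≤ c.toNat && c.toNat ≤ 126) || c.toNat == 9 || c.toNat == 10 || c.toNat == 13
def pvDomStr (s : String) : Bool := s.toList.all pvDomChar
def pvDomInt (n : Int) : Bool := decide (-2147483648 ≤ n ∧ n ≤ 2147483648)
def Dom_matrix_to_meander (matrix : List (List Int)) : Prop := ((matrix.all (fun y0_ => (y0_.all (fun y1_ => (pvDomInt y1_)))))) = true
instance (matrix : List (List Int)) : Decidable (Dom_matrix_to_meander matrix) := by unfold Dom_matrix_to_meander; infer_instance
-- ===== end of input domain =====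

-- B replaces A's used-array with its two scanning while-loops and cur_min_free tracking by one
-- sorted free-position list popped at index line_sum per row (objective: simpler).

-- ===== PORT A =====
-- `while plus != line_sum: if not used[pos-1]: plus += 1; pos += 1` (fuel = len(used)+1 suffices:
-- the loop either exits or reaches an out-of-range index — Python's IndexError — within that many steps)
def pvA_loop1 (used : List Bool) (lineSum : Int) : Nat → Int → Int → Option Int
  | 0, _, _ => none
  | fuel + 1, pos, plus =>
    if plus = lineSum then some pos
    else
      match PySem.List.pyGet? used (pos - 1) with
      | none => none
      | some u => pvA_loop1 used lineSum fuel (pos + 1) (if u then plus else plus + 1)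

-- `while used[pos-1]: pos += 1` (same fuel argument)
def pvA_loop2 (used : List Bool) : Nat → Int → Option Int
  | 0, _ => none
  | fuel + 1, pos =>
    match PySem.List.pyGet? used (pos - 1) with
    | none => none
    | some u => if u then pvA_loop2 used fuel (pos + 1) else some pos

-- the `for i in range(n)` loop over the state (ans_meander, cur_min_free, used)
def pvA_go (matrix : List (List Int)) (n : Nat) : Nat → List Int → Int → List Bool → Option (List Int)
  | i, ans, cur, used =>
    if _h : i < n then
      match PySem.List.pyGet? matrix (i : Int) with
      | none => none
      | some row =>
        let lineSum := (PySem.List.slice row (some (i : Int)) none).sum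
        match pvA_loop1 used lineSum (used.length + 1) cur 0 with
        | none => none
        | some pos1 =>
          match pvA_loop2 used (used.length + 1) pos1 with
          | none => none
          | some pos =>
            match PySem.List.pySet? ans (i : Int) pos with
            | none => none
            | some ans' =>
              match PySem.List.pySet? used (pos - 1) true with
              | none => none
              | some used' => pvA_go matrix n (i + 1) ans' (if pos = cur then cur + 1 else cur) used'
    else some ans
  termination_by i _ _ _ => n - i

def matrix_to_meander (matrix : List (List Int)) : List Int :=
  let n := matrix.length
  (pvA_go matrix n 0 (List.replicate n (0 : Int)) 1 (List.replicate n false)).getD []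

-- ===== PORT B =====
-- `[free.pop(sum(row[i:])) for i, row in enumerate(matrix)]`
def pvB_go (i : Nat) (free : List Int) : List (List Int) → Option (List Int)
  | [] => some []
  | row :: rest =>
    match PySem.List.pop? free ((PySem.List.slice row (some (i : Int)) none).sum) with
    | none => none
    | some (v, free') =>
      match pvB_go (i + 1) free' rest with
      | none => none
      | some tail => some (v :: tail)

def matrix_to_meander_alt (matrix : List (List Int)) : List Int :=
  (pvB_go 0 (PySem.List.pyRange 1 ((matrix.length : Int) + 1) 1) matrix).getD []

-- ===== PRECONDITION & SPEC =====
-- Pre_ holds exactly when every suffix row-sum selects an existing free slot; on every other input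
-- Python A raises IndexError (negative line_sum, or line_sum ≥ number of remaining free slots).
def Pre_matrix_to_meander (matrix : List (List Int)) : Prop :=
  ∀ i, i < matrix.length →
    0 ≤ ((matrix.getD i []).drop i).sum ∧
    ((matrix.getD i []).drop i).sum < (matrix.length : Int) - i
instance (matrix : List (List Int)) : Decidable (Pre_matrix_to_meander matrix) := by
  unfold Pre_matrix_to_meander; infer_instance

def pvWitness_matrix_to_meander : List (List Int) := [[0, 1], [0]]

def Spec_matrix_to_meander (matrix : List (List Int)) (out : List Int) : Prop := out = matrix_to_meander_alt matrix
instance (matrix : List (List Int)) (out : List Int) : Decidable (Spec_matrix_to_meander matrix out) := by unfold Spec_matrix_to_meander; infer_instance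

-- ===== CLAIM (what is proved, stated in full; the proofs are below) =====
def Claim_equal_matrix_to_meander : Prop := ∀ (matrix : List (List Int)), Dom_matrix_to_meander matrix → Pre_matrix_to_meander matrix → Spec_matrix_to_meander matrix (matrix_to_meander matrix)

-- ===== LEMMAS AND PROOFS =====

-- the (0-based) indices of the still-free positions ≥ j
def pvFree (used : List Bool) (j : Nat) : List Nat :=
  (List.range' j (used.length - j)).filter (fun k => !used.getD k false)

lemma pvFree_ge (used : List Bool) (j : Nat) (h : used.length ≤ j) : pvFree used j = [] := by
  unfold pvFree
  have : used.length - j = 0 := by omega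
  simp [this]

lemma pvFree_succ (used : List Bool) (j : Nat) (h : j < used.length) :
    pvFree used j = if used.getD j false then pvFree used (j + 1) else j :: pvFree used (j + 1) := by
  unfold pvFree
  have h1 : used.length - j = (used.length - (j + 1)) + 1 := by omega
  rw [h1, List.range'_succ, List.filter_cons]
  by_cases hu : used.getD j false <;>
    simp [List.getD_eq_getElem?_getD] at hu <;> simp [hu]

lemma pvFree_lt (used : List Bool) (j : Nat) (h : 0 < (pvFree used j).length) : j < used.length := by
  by_contra hc
  rw [pvFree_ge used j (by omega)] at h
  simp at h


lemma pvFree_mem (used : List Bool) {j k : Nat} (h : k ∈ pvFree used j) :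
    j ≤ k ∧ k < used.length ∧ used.getD k false = false := by
  unfold pvFree at h
  rw [List.mem_filter] at h
  obtain ⟨h1, h2⟩ := h
  rw [List.mem_range'_1] at h1
  simp [List.getD_eq_getElem?_getD]
  constructor
  · omega
  constructor
  · omega
  · simpa [List.getD_eq_getElem?_getD] using h2

lemma pvFree_nodup (used : List Bool) (j : Nat) : (pvFree used j).Nodup := by
  unfold pvFree
  exact (List.nodup_range').filter _

lemma pvFree_eq_zero (used : List Bool) :
    ∀ j, j ≤ used.length → (∀ m, m < j → used.getD m false = true) →
      pvFree used j = pvFree used 0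
  | 0, _, _ => rfl
  | j + 1, hj, hm => by
    have h1 : pvFree used j = pvFree used (j + 1) := by
      rw [pvFree_succ used j (by omega), hm j (by omega)]
      simp
    rw [← h1]
    exact pvFree_eq_zero used j (by omega) (fun m hmj => hm m (by omega))

-- loop2 returns the first free position ≥ its start
lemma pvA_loop2_spec (used : List Bool) :
    ∀ fuel j, used.length < fuel + j → 0 < (pvFree used j).length →
      pvA_loop2 used fuel ((j : Int) + 1) = some (((pvFree used j).getD 0 0 : Int) + 1)
  | 0, j, hf, hlen => by
    have := pvFree_lt used j hlen
    omega
  | fuel + 1, j, hf, hlen => by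
    have hj : j < used.length := pvFree_lt used j hlen
    unfold pvA_loop2
    have he : (j : Int) + 1 - 1 = ((j : Nat) : Int) := by ring
    rw [he, PySem.List.pyGet?_natCast, List.getElem?_eq_getElem hj]
    have hgd : used.getD j false = used[j] := List.getD_eq_getElem used false hj
    by_cases hu : used[j]
    · rw [pvFree_succ used j hj, hgd, hu]
      have h2 : 0 < (pvFree used (j + 1)).length := by
        rw [pvFree_succ used j hj, hgd, hu] at hlen
        simpa using hlen
      have := pvA_loop2_spec used fuel (j + 1) (by omega) h2
      push_cast at this ⊢
      rw [show (j : Int) + 1 + 1 = ((j : Int) + 1) + 1 by ring] at this ⊢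
      convert this using 3
    · rw [pvFree_succ used j hj, hgd]
      simp [hu]

-- loop1 followed by loop2 selects the (lineSum - plus)-th free position ≥ its start
lemma pvA_loop12_spec (used : List Bool) (s : Int) :
    ∀ fuel (plus : Int) j, 0 ≤ s - plus → (s - plus).toNat < (pvFree used j).length →
      used.length < fuel + j →
      (pvA_loop1 used s fuel ((j : Int) + 1) plus).bind
          (fun p => pvA_loop2 used (used.length + 1) p)
        = some (((pvFree used j).getD (s - plus).toNat 0 : Int) + 1)
  | 0, plus, j, hp, hlen, hf => by
    have := pvFree_lt used j (by omega)
    omega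
  | fuel + 1, plus, j, hp, hlen, hf => by
    have hj : j < used.length := pvFree_lt used j (by omega)
    unfold pvA_loop1
    by_cases hps : plus = s
    · subst hps
      rw [if_pos rfl]
      rw [show ∀ (o : Int) (f : Int → Option Int), (some o).bind f = f o from fun _ _ => rfl]
      have h0 : (plus - plus).toNat = 0 := by omega
      rw [h0] at hlen ⊢
      exact pvA_loop2_spec used (used.length + 1) j (by omega) hlen
    · rw [if_neg (by exact hps)]
      have he : (j : Int) + 1 - 1 = ((j : Nat) : Int) := by ring
      rw [he, PySem.List.pyGet?_natCast, List.getElem?_eq_getElem hj]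
      have hgd : used.getD j false = used[j] := List.getD_eq_getElem used false hj
      have hrec : pvFree used j
          = if used.getD j false then pvFree used (j + 1) else j :: pvFree used (j + 1) :=
        pvFree_succ used j hj
      by_cases hu : used[j]
      · simp only [hu, if_true]
        have hfr : pvFree used j = pvFree used (j + 1) := by rw [hrec, hgd, hu]; simp
        have := pvA_loop12_spec used s fuel plus (j + 1) hp (by rw [← hfr]; exact hlen)
          (by omega)
        push_cast at this ⊢
        rw [← hfr] at this
        rw [show (j : Int) + 1 + 1 = ((j : Int) + 1) + 1 by ring] at this ⊢
        exact this
      · simp only [hu]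
        have hfr : pvFree used j = j :: pvFree used (j + 1) := by rw [hrec, hgd]; simp [hu]
        have hp' : 0 ≤ s - (plus + 1) := by omega
        have hlen' : (s - (plus + 1)).toNat < (pvFree used (j + 1)).length := by
          rw [hfr] at hlen
          simp at hlen
          omega
        have := pvA_loop12_spec used s fuel (plus + 1) (j + 1) hp' hlen' (by omega)
        push_cast at this ⊢
        rw [show (j : Int) + 1 + 1 = ((j : Int) + 1) + 1 by ring] at this ⊢
        rw [this, hfr]
        have ht : (s - plus).toNat = (s - (plus + 1)).toNat + 1 := by omega
        rw [ht]
        simp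

lemma pvFilter_ne_eq_eraseIdx :
    ∀ (l : List Nat) (t p : Nat), l.Nodup → l[t]? = some p →
      l.filter (fun k => k ≠ p) = l.eraseIdx t
  | [], t, p, _, h => by simp at h
  | a :: l, 0, p, hnd, h => by
    have hap : a = p := by simpa using h
    subst hap
    have ha : a ∉ l := (List.nodup_cons.1 hnd).1
    rw [List.eraseIdx_cons_zero, List.filter_cons_of_neg (by simp)]
    exact List.filter_eq_self.2 (fun x hx => by
      simp only [ne_eq, decide_eq_true_eq]
      exact fun hxa => ha (hxa ▸ hx))
  | a :: l, t + 1, p, hnd, h => by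
    simp only [List.getElem?_cons_succ] at h
    have hpl : p ∈ l := List.mem_of_getElem? h
    have hap : a ≠ p := fun hap => (List.nodup_cons.1 hnd).1 (hap ▸ hpl)
    rw [List.eraseIdx_cons_succ, List.filter_cons]
    rw [if_pos (by simpa using hap)]
    rw [pvFilter_ne_eq_eraseIdx l t p (List.nodup_cons.1 hnd).2 h]

lemma pvFree_set (used : List Bool) (p : Nat) (hp : p < used.length) :
    pvFree (used.set p true) 0 = (pvFree used 0).filter (fun k => k ≠ p) := by
  unfold pvFree
  rw [List.length_set, List.filter_filter]
  apply List.filter_congr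
  intro k hk
  rw [List.mem_range'_1] at hk
  by_cases hkp : k = p
  · subst hkp
    simp [List.getD_eq_getElem?_getD, hp]
  · simp [List.getD_eq_getElem?_getD, List.getElem?_set_ne (fun h => hkp h.symm), hkp]

lemma pvTake_set_succ {α : Type} :
    ∀ (l : List α) (i : Nat) (v : α), i < l.length →
      (l.set i v).take (i + 1) = l.take i ++ [v]
  | [], i, v, h => by simp at h
  | a :: l, 0, v, _ => by simp
  | a :: l, i + 1, v, h => by
    simp only [List.set_cons_succ, List.take_succ_cons]
    rw [pvTake_set_succ l i v (by simpa using h)]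
    simp

lemma pvMain (matrix : List (List Int)) (hpre : Pre_matrix_to_meander matrix) :
    ∀ (rest : List (List Int)) (i : Nat) (ans : List Int) (cur : Int) (used : List Bool),
      matrix.drop i = rest →
      ans.length = matrix.length →
      used.length = matrix.length →
      (pvFree used 0).length = matrix.length - i →
      1 ≤ cur → cur ≤ (used.length : Int) + 1 →
      (∀ m : Nat, (m : Int) < cur - 1 → used.getD m false = true) →
      ∃ l, pvB_go i ((pvFree used 0).map (fun k : Nat => (k : Int) + 1)) rest = some l ∧
           pvA_go matrix matrix.length i ans cur used = some (ans.take i ++ l) := by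
  intro rest
  induction rest with
  | nil =>
    intro i ans cur used hdrop hans hused hflen hc1 hc2 hinv
    have hlen0 : matrix.length - i = 0 := by
      have := congrArg List.length hdrop
      simpa using this
    refine ⟨[], rfl, ?_⟩
    rw [pvA_go, dif_neg (by omega)]
    rw [List.take_of_length_le (by omega), List.append_nil]
  | cons row rest' IH =>
    intro i ans cur used hdrop hans hused hflen hc1 hc2 hinv
    have hi : i < matrix.length := by
      have := congrArg List.length hdrop
      simp at this
      omega
    have hrow : matrix[i]? = some row := by
      have h0 : (matrix.drop i)[0]? = matrix[i + 0]? := List.getElem?_drop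
      rw [hdrop] at h0
      simpa using h0.symm
    obtain ⟨hs0, hslt⟩ := hpre i hi
    have hgdrow : matrix.getD i [] = row := by
      rw [List.getD_eq_getElem?_getD, hrow]
      rfl
    rw [hgdrow] at hs0 hslt
    set s : Int := (row.drop i).sum with hs
    set t : Nat := s.toNat with htdef
    have hts : (t : Int) = s := Int.toNat_of_nonneg hs0
    have htlen : t < (pvFree used 0).length := by rw [hflen]; omega
    set j0 : Nat := (cur - 1).toNat with hj0
    have hcur : cur = (j0 : Int) + 1 := by omega
    have hj0le : j0 ≤ used.length := by omega
    have hfr0 : pvFree used j0 = pvFree used 0 :=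
      pvFree_eq_zero used j0 hj0le (fun m hm => hinv m (by omega))
    set p : Nat := (pvFree used 0).getD t 0 with hp
    set pos : Int := (p : Int) + 1 with hposdef
    have h12 := pvA_loop12_spec used s (used.length + 1) 0 j0 (by omega)
      (by rw [hfr0]; simpa using htlen) (by omega)
    rw [← hcur, hfr0] at h12
    simp only [Int.sub_zero] at h12
    have hpelem : (pvFree used 0)[t]? = some p := by
      rw [List.getElem?_eq_getElem htlen, hp, List.getD_eq_getElem _ _ htlen]
    have hpmem : p ∈ pvFree used 0 := by
      exact List.mem_of_getElem? hpelem
    obtain ⟨-, hplen, hpfree⟩ := pvFree_mem used hpmem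
    obtain ⟨pos1, hpos1, hpos2⟩ : ∃ pos1,
        pvA_loop1 used s (used.length + 1) cur 0 = some pos1 ∧
        pvA_loop2 used (used.length + 1) pos1 = some pos := by
      cases hb : pvA_loop1 used s (used.length + 1) cur 0 with
      | none => rw [hb] at h12; simp at h12
      | some q => rw [hb] at h12; exact ⟨q, rfl, by simpa using h12⟩
    -- the new state
    have hfset : pvFree (used.set p true) 0 = (pvFree used 0).eraseIdx t := by
      rw [pvFree_set used p hplen,
        pvFilter_ne_eq_eraseIdx (pvFree used 0) t p (pvFree_nodup used 0) hpelem]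
    have hflen' : (pvFree (used.set p true) 0).length = matrix.length - (i + 1) := by
      rw [hfset, List.length_eraseIdx, if_pos htlen]
      omega
    set cur' : Int := if pos = cur then cur + 1 else cur with hcur'
    have hc1' : 1 ≤ cur' := by rw [hcur']; split <;> omega
    have hc2' : cur' ≤ ((used.set p true).length : Int) + 1 := by
      rw [hcur', List.length_set]
      split
      · omega
      · omega
    have hinv' : ∀ m : Nat, (m : Int) < cur' - 1 → (used.set p true).getD m false = true := by
      intro m hm
      rw [List.getD_eq_getElem?_getD]
      by_cases hmp : m = p
      · subst hmp
        rw [List.getElem?_set_self hplen]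
        rfl
      · rw [List.getElem?_set_ne (fun h => hmp h.symm), ← List.getD_eq_getElem?_getD]
        apply hinv
        rw [hcur'] at hm
        by_cases hpc : pos = cur
        · rw [if_pos hpc] at hm
          have : (m : Int) ≠ (p : Int) := by
            intro h
            exact hmp (by exact_mod_cast h)
          omega
        · rw [if_neg hpc] at hm
          omega
    have hdrop' : matrix.drop (i + 1) = rest' := by
      have h1 := congrArg (List.drop 1) hdrop
      rw [List.drop_drop] at h1
      simpa [Nat.add_comm] using h1
    obtain ⟨l, hB, hA⟩ := IH (i + 1) (ans.set i pos) cur' (used.set p true)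
      hdrop' (by simpa using hans) (by simpa using hused) hflen' hc1' hc2' hinv'
    refine ⟨pos :: l, ?_, ?_⟩
    · -- B side
      rw [pvB_go]
      have hF : t < ((pvFree used 0).map (fun k : Nat => (k : Int) + 1)).length := by
        simpa using htlen
      have hpop := PySem.List.pop?_natCast ((pvFree used 0).map (fun k : Nat => (k : Int) + 1)) t hF
      have hget : ((pvFree used 0).map (fun k : Nat => (k : Int) + 1))[t]'hF = pos := by
        rw [List.getElem_map, hposdef, hp, List.getD_eq_getElem _ _ htlen]
      have herase : ((pvFree used 0).map (fun k : Nat => (k : Int) + 1)).eraseIdx t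
          = (pvFree (used.set p true) 0).map (fun k : Nat => (k : Int) + 1) := by
        rw [hfset, List.eraseIdx_map]
      rw [PySem.List.slice_from_natCast, ← hs, ← hts]
      simp only [hpop, hget, herase, hB]
    · -- A side
      rw [pvA_go, dif_pos hi]
      rw [PySem.List.pyGet?_natCast, hrow]
      simp only [PySem.List.slice_from_natCast, ← hs]
      have hset1 : PySem.List.pySet? ans ((i : Nat) : Int) pos = some (ans.set i pos) :=
        PySem.List.pySet?_natCast ans i pos (by omega)
      have hpos1' : pos - 1 = ((p : Nat) : Int) := by rw [hposdef]; ring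
      have hset2 : PySem.List.pySet? used (pos - 1) true = some (used.set p true) := by
        rw [hpos1']
        exact PySem.List.pySet?_natCast used p true hplen
      simp only [hpos1, hpos2, hset1, hset2, ← hcur', hA]
      rw [pvTake_set_succ ans i pos (by omega)]
      simp

lemma pvFree_replicate (n : Nat) : pvFree (List.replicate n false) 0 = List.range' 0 n := by
  unfold pvFree
  rw [List.length_replicate, Nat.sub_zero]
  apply List.filter_eq_self.2
  intro k hk
  rw [List.mem_range'_1] at hk
  have hkn : k < n := by omega
  simp [List.getD_eq_getElem?_getD, hkn]

theorem matrix_to_meander_spec : Claim_equal_matrix_to_meander := by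
  intro matrix _hdom hpre
  unfold Spec_matrix_to_meander
  have hfree : PySem.List.pyRange 1 ((matrix.length : Int) + 1) 1
      = (pvFree (List.replicate matrix.length false) 0).map (fun k : Nat => (k : Int) + 1) := by
    rw [pvFree_replicate, PySem.List.pyRange_one]
    have h1 : ((matrix.length : Int) + 1 - 1).toNat = matrix.length := by omega
    rw [h1, List.range_eq_range']
    apply List.map_congr_left
    intro k _
    ring
  obtain ⟨l, hB, hA⟩ := pvMain matrix hpre matrix 0
    (List.replicate matrix.length (0 : Int)) 1 (List.replicate matrix.length false)
    (by simp) (by simp) (by simp) (by rw [pvFree_replicate]; simp) (by norm_num)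
    (by simp) (fun m hm => by omega)
  show (pvA_go matrix matrix.length 0 (List.replicate matrix.length (0 : Int)) 1
      (List.replicate matrix.length false)).getD []
    = (pvB_go 0 (PySem.List.pyRange 1 ((matrix.length : Int) + 1) 1) matrix).getD []
  rw [hfree, hB, hA]
  simp
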